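-- pv_equiv track=rewrite | github.com/thaReal/MasterChef | codeforces/ed_round_85/middle.py | solve
-- ===== SOURCE A (Python) =====
-- def solve(n, x, a):
-- 	wealthy = 0
-- 	poor = []
-- 	money = 0
--
-- 	net = [i - x for i in a]
-- 	for p in net:
-- 		if p >= 0:
-- 			wealthy += 1
-- 			money += p
-- 		else:
-- 			poor.append(p)
--
-- 	poor.sort()
-- 	for i in poor:
-- 		money += i
-- 		if money >= 0:
-- 			wealthy += 1
-- 		else:
-- 			break
--
-- 	return wealthy
-- ===== SOURCE B (Python) =====
-- def solve(n, x, a):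
--     pos = [v - x for v in a if v - x >= 0]
--     neg = sorted(v - x for v in a if v - x < 0)
--     P = sum(pos)
--     pref = []
--     s = 0
--     for d in neg:
--         s += d
--         pref.append(s)
--     # pref is strictly decreasing, so P + pref[i] >= 0 holds on an initial run;
--     # binary search for its length instead of scanning with a break
--     lo, hi = 0, len(pref)
--     while lo < hi:
--         mid = (lo + hi) // 2
--         if P + pref[mid] >= 0:
--             lo = mid + 1
--         else:
--             hi = mid
--     return len(pos) + lo
-- ===== Notes on version B (the rewrite author's own statement) =====
-- stated objective: alternative
-- what changed: Instead of scanning the sorted deficits with a running total and an early break, B builds their prefix-sum array and binary-searches for the length of the initial run where the surplus still covers the prefix (the prefix sums are strictly decreasing, so the condition holds exactly on an initial run).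
import Mathlib
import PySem

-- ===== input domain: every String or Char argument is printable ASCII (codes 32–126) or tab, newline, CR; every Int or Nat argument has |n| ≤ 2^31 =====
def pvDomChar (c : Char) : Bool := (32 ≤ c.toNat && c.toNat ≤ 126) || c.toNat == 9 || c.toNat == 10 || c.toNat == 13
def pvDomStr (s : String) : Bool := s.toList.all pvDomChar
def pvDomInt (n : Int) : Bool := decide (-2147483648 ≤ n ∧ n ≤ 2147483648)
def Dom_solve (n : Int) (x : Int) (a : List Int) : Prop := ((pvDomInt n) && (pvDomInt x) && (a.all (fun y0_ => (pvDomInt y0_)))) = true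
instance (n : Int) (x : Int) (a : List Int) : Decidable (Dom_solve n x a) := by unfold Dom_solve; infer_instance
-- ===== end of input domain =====

-- B replaces A's break-scan over the sorted deficits by a prefix-sum array plus a binary
-- search for the length of the initial run the surplus still covers (alternative decomposition).

-- ===== PORT A =====
-- second loop of A: add each sorted deficit to money, count while money >= 0, break otherwise
def solveLoop2 (money : Int) (wealthy : Int) : List Int → Int
  | [] => wealthy
  | i :: t =>
    let m := money + i
    if m ≥ 0 then solveLoop2 m (wealthy + 1) t else wealthy

def solve (n : Int) (x : Int) (a : List Int) : Int :=
  let net := a.map (fun i => i - x)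
  let st := net.foldl (fun (s : Int × Int × List Int) p =>
      if p ≥ 0 then (s.1 + 1, s.2.1 + p, s.2.2) else (s.1, s.2.1, s.2.2 ++ [p]))
    (0, 0, [])
  let poor := PySem.List.sorted st.2.2 (fun y => y) false
  solveLoop2 st.2.1 st.1 poor

-- ===== PORT B =====
-- B's while-loop: binary search for the boundary of the initial run with P + pref[i] >= 0
def bsearchRun (P : Int) (pref : List Int) (lo hi : Nat) : Nat :=
  if _h : lo < hi then
    let mid := (lo + hi) / 2
    if P + pref.getD mid 0 ≥ 0 then bsearchRun P pref (mid + 1) hi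
    else bsearchRun P pref lo mid
  else lo
termination_by hi - lo
decreasing_by all_goals omega

def solve_alt (n : Int) (x : Int) (a : List Int) : Int :=
  let pos := (a.map (fun v => v - x)).filter (fun d => decide (d ≥ 0))
  let neg := PySem.List.sorted ((a.map (fun v => v - x)).filter (fun d => decide (d < 0))) (fun y => y) false
  let P := pos.sum
  let pref := (neg.foldl (fun (s : Int × List Int) d => (s.1 + d, s.2 ++ [s.1 + d])) (0, [])).2
  (pos.length : Int) + (bsearchRun P pref 0 pref.length : Int)

-- ===== PRECONDITION & SPEC =====
def Spec_solve (n : Int) (x : Int) (a : List Int) (out : Int) : Prop := out = solve_alt n x a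
instance (n : Int) (x : Int) (a : List Int) (out : Int) : Decidable (Spec_solve n x a out) := by unfold Spec_solve; infer_instance

-- ===== CLAIM (what is proved, stated in full; the proofs are below) =====
def Claim_equal_solve : Prop := ∀ (n : Int) (x : Int) (a : List Int), Dom_solve n x a → Spec_solve n x a (solve n x a)

-- ===== LEMMAS AND PROOFS =====

-- prefix sums of l starting from s
def prefList (s : Int) : List Int → List Int
  | [] => []
  | d :: t => (s + d) :: prefList (s + d) t

-- A's run-count: how many sorted deficits the second loop absorbs before money < 0
def cnt (m : Int) : List Int → Nat
  | [] => 0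
  | d :: t => if m + d ≥ 0 then cnt (m + d) t + 1 else 0

theorem length_prefList (s : Int) (l : List Int) : (prefList s l).length = l.length := by
  induction l generalizing s with
  | nil => rfl
  | cons d t ih => simp [prefList, ih]

theorem prefList_shift (s t : Int) (l : List Int) :
    prefList (s + t) l = (prefList t l).map (fun y => s + y) := by
  induction l generalizing t with
  | nil => rfl
  | cons d tl ih =>
    simp only [prefList, List.map_cons]
    rw [show s + t + d = s + (t + d) from by ring, ih (t + d)]

theorem prefList_getD_shift (s : Int) (l : List Int) (i : Nat) (hi : i < l.length) :
    (prefList s l).getD i 0 = s + (prefList 0 l).getD i 0 := by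
  have h : prefList s l = (prefList 0 l).map (fun y => s + y) := by
    have := prefList_shift s 0 l; simpa using this
  rw [h]
  rw [List.getD_eq_getElem _ _ (by simpa [length_prefList] using hi),
      List.getD_eq_getElem _ _ (by simpa [length_prefList] using hi)]
  simp

theorem fold2_prefList (l : List Int) (s0 : Int) (acc : List Int) :
    l.foldl (fun (s : Int × List Int) d => (s.1 + d, s.2 ++ [s.1 + d])) (s0, acc)
      = (s0 + l.sum, acc ++ prefList s0 l) := by
  induction l generalizing s0 acc with
  | nil => simp [prefList]
  | cons d t ih =>
    simp only [List.foldl_cons, ih, prefList, List.sum_cons]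
    simp [add_assoc]

theorem foldA_char (l : List Int) (w m : Int) (p : List Int) :
    l.foldl (fun (s : Int × Int × List Int) q =>
        if q ≥ 0 then (s.1 + 1, s.2.1 + q, s.2.2) else (s.1, s.2.1, s.2.2 ++ [q])) (w, m, p)
      = (w + ((l.filter (fun d => decide (d ≥ 0))).length : Int),
         m + (l.filter (fun d => decide (d ≥ 0))).sum,
         p ++ l.filter (fun d => decide (d < 0))) := by
  induction l generalizing w m p with
  | nil => simp
  | cons d t ih =>
    by_cases hd : d ≥ 0
    · simp only [List.foldl_cons, if_pos hd, ih, List.filter_cons]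
      have h1 : decide (d ≥ 0) = true := by simpa using hd
      have h2 : decide (d < 0) = false := by simpa using not_lt.mpr hd
      simp [h1, h2]
      constructor
      · ring
      · ring
    · simp only [List.foldl_cons, if_neg hd, ih, List.filter_cons]
      have h1 : decide (d ≥ 0) = false := by simpa using hd
      have h2 : decide (d < 0) = true := by simpa using lt_of_not_ge hd
      simp [h1, h2]

theorem loopA_eq_cnt (l : List Int) (m w : Int) :
    solveLoop2 m w l = w + (cnt m l : Int) := by
  induction l generalizing m w with
  | nil => simp [solveLoop2, cnt]
  | cons d t ih =>
    by_cases h : m + d ≥ 0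
    · simp only [solveLoop2, cnt, if_pos h, ih]; push_cast; ring
    · simp [solveLoop2, cnt, if_neg h]

theorem cnt_le_length (m : Int) (l : List Int) : cnt m l ≤ l.length := by
  induction l generalizing m with
  | nil => simp [cnt]
  | cons d t ih =>
    by_cases h : m + d ≥ 0
    · simpa [cnt, if_pos h] using Nat.succ_le_succ (ih (m + d))
    · simp [cnt, if_neg h]

theorem cnt_lower (l : List Int) (m : Int) (i : Nat) (hi : i < cnt m l) :
    0 ≤ m + (prefList 0 l).getD i 0 := by
  induction l generalizing m i with
  | nil => simp [cnt] at hi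
  | cons d t ih =>
    by_cases h : m + d ≥ 0
    · rw [cnt, if_pos h] at hi
      match i with
      | 0 => simpa [prefList] using h
      | Nat.succ j =>
        have hj : j < cnt (m + d) t := Nat.lt_of_succ_lt_succ hi
        have hjl : j < t.length := lt_of_lt_of_le hj (cnt_le_length _ _)
        have := ih (m + d) j hj
        simp only [prefList, List.getD_cons_succ, zero_add]
        rw [prefList_getD_shift d t j hjl]
        omega
    · rw [cnt, if_neg h] at hi; omega

theorem cnt_upper (l : List Int) (m : Int) (hl : cnt m l < l.length) :
    ¬ 0 ≤ m + (prefList 0 l).getD (cnt m l) 0 := by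
  induction l generalizing m with
  | nil => simp at hl
  | cons d t ih =>
    by_cases h : m + d ≥ 0
    · rw [cnt, if_pos h] at hl ⊢
      have hl' : cnt (m + d) t < t.length := by simpa using hl
      have := ih (m + d) hl'
      simp only [prefList, List.getD_cons_succ, zero_add]
      rw [prefList_getD_shift d t _ hl']
      omega
    · rw [cnt, if_neg h]
      simpa [prefList] using h

theorem prefList_neg (l : List Int) (hneg : ∀ d ∈ l, d < 0) (i : Nat) (hi : i < l.length) :
    (prefList 0 l).getD i 0 < 0 := by
  induction l generalizing i with
  | nil => simp at hi
  | cons d t ih =>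
    match i with
    | 0 =>
      have := hneg d (List.mem_cons_self)
      simpa [prefList] using this
    | Nat.succ j =>
      have hj : j < t.length := by simpa using hi
      have hd := hneg d (List.mem_cons_self)
      have ht := ih (fun e he => hneg e (List.mem_cons_of_mem d he)) j hj
      simp only [prefList, List.getD_cons_succ, zero_add]
      rw [prefList_getD_shift d t j hj]
      omega

theorem prefList_anti (l : List Int) (hneg : ∀ d ∈ l, d < 0) (i j : Nat)
    (hij : i ≤ j) (hj : j < l.length) :
    (prefList 0 l).getD j 0 ≤ (prefList 0 l).getD i 0 := by
  induction l generalizing i j with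
  | nil => simp at hj
  | cons d t ih =>
    match i, j with
    | 0, 0 => exact le_refl _
    | 0, Nat.succ j' =>
      have hj' : j' < t.length := by simpa using hj
      have := prefList_neg t (fun e he => hneg e (List.mem_cons_of_mem d he)) j' hj'
      simp only [prefList, List.getD_cons_succ, List.getD_cons_zero, zero_add]
      rw [prefList_getD_shift d t j' hj']
      omega
    | Nat.succ i', 0 => exact absurd hij (by omega)
    | Nat.succ i', Nat.succ j' =>
      have hj' : j' < t.length := by simpa using hj
      have hi' : i' < t.length := lt_of_le_of_lt (by omega) hj'
      have := ih (fun e he => hneg e (List.mem_cons_of_mem d he)) i' j' (by omega) hj'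
      simp only [prefList, List.getD_cons_succ, zero_add]
      rw [prefList_getD_shift d t j' hj', prefList_getD_shift d t i' hi']
      omega

theorem bsearchRun_spec (P : Int) (pref : List Int) (lo hi : Nat)
    (hhi : hi ≤ pref.length) (hlo : lo ≤ hi)
    (hmono : ∀ i j : Nat, i ≤ j → j < pref.length → 0 ≤ P + pref.getD j 0 → 0 ≤ P + pref.getD i 0)
    (hbelow : ∀ i < lo, 0 ≤ P + pref.getD i 0)
    (habove : ∀ i : Nat, hi ≤ i → i < pref.length → ¬ 0 ≤ P + pref.getD i 0) :
    (∀ i < bsearchRun P pref lo hi, 0 ≤ P + pref.getD i 0) ∧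
    (bsearchRun P pref lo hi < pref.length → ¬ 0 ≤ P + pref.getD (bsearchRun P pref lo hi) 0) ∧
    bsearchRun P pref lo hi ≤ pref.length := by
  fun_induction bsearchRun P pref lo hi with
  | case1 lo hi h mid hpred ih =>
    apply ih hhi (by omega)
    · intro i hilt
      exact hmono i mid (by omega) (by omega) hpred
    · exact habove
  | case2 lo hi h mid hpred ih =>
    apply ih (by omega) (by omega) hbelow
    intro i hmi hil
    intro hci
    exact hpred (hmono mid i hmi hil hci)
  | case3 lo hi h =>
    refine ⟨hbelow, fun hlt => habove lo (by omega) hlt, by omega⟩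

theorem cnt_eq_bsearch (P : Int) (l : List Int) (hneg : ∀ d ∈ l, d < 0) :
    cnt P l = bsearchRun P (prefList 0 l) 0 (prefList 0 l).length := by
  have hlen : (prefList 0 l).length = l.length := length_prefList 0 l
  have hmono : ∀ i j : Nat, i ≤ j → j < (prefList 0 l).length → 0 ≤ P + (prefList 0 l).getD j 0 → 0 ≤ P + (prefList 0 l).getD i 0 := by
    intro i j hij hj hcj
    have := prefList_anti l hneg i j hij (hlen ▸ hj)
    omega
  obtain ⟨blow, bup, ble⟩ := bsearchRun_spec P (prefList 0 l) 0 (prefList 0 l).length (le_refl _) (Nat.zero_le _)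
    hmono (by omega) (by omega)
  set k := bsearchRun P (prefList 0 l) 0 (prefList 0 l).length with hk
  have clow : ∀ i < cnt P l, 0 ≤ P + (prefList 0 l).getD i 0 := fun i hi => cnt_lower l P i hi
  have cle : cnt P l ≤ (prefList 0 l).length := hlen ▸ cnt_le_length P l
  have cup : cnt P l < (prefList 0 l).length → ¬ 0 ≤ P + (prefList 0 l).getD (cnt P l) 0 := by
    intro h; exact cnt_upper l P (hlen ▸ h)
  rcases Nat.lt_trichotomy (cnt P l) k with h | h | h
  · exact absurd (blow _ h) (cup (lt_of_lt_of_le h ble))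
  · exact h
  · exact absurd (clow _ h) (bup (lt_of_lt_of_le h cle))

-- ===== VERDICT (by name: the statement is the Claim_ definition above) =====
theorem solve_spec : Claim_equal_solve := by
  intro n x a _
  unfold Spec_solve solve solve_alt
  simp only [foldA_char, fold2_prefList, List.nil_append, loopA_eq_cnt, zero_add]
  have hneg : ∀ d ∈ PySem.List.sorted ((a.map (fun v => v - x)).filter (fun d => decide (d < 0))) (fun y => y) false, d < 0 := by
    intro d hd
    rw [PySem.List.mem_sorted] at hd
    have := List.of_mem_filter hd
    simpa using this
  rw [cnt_eq_bsearch _ _ hneg]
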